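-- pv_equiv track=rewrite | github.com/yyht/BERT | BERT/t2t_bert/data_generator/nlm_utils.py | build_continuations
-- ===== SOURCE A (Python) =====
-- from collections import defaultdict
--
-- def build_continuations(ngm_count_dict):
-- 	total = defaultdict(int)
-- 	distinct = defaultdict(int)
-- 	for key in ngm_count_dict:
-- 		context = key[:-1] # for bigram, just get the first token
-- 		total[context] += ngm_count_dict[key]
-- 		distinct[context] += 1
-- 	return {"total": total, "distinct": distinct}
-- ===== SOURCE B (Python) =====
-- from collections import defaultdict
--
-- def build_continuations(ngm_count_dict):
--     pairs = [(k[:-1], v) for k, v in ngm_count_dict.items()]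
--     groups = {}
--     for c, v in pairs:
--         groups.setdefault(c, []).append(v)
--     total = defaultdict(int)
--     distinct = defaultdict(int)
--     for c, g in groups.items():
--         total[c] = sum(g)
--         distinct[c] = len(g)
--     return {"total": total, "distinct": distinct}
-- ===== Notes on version B (the rewrite author's own statement) =====
-- stated objective: alternative
-- what changed: A makes one pass keeping two running defaultdict(int) accumulators updated in place per key; B first materialises the groups — a dict mapping each context prefix to the list of its values — and then writes each context's sum and group size from the materialised groups.
import Mathlib
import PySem

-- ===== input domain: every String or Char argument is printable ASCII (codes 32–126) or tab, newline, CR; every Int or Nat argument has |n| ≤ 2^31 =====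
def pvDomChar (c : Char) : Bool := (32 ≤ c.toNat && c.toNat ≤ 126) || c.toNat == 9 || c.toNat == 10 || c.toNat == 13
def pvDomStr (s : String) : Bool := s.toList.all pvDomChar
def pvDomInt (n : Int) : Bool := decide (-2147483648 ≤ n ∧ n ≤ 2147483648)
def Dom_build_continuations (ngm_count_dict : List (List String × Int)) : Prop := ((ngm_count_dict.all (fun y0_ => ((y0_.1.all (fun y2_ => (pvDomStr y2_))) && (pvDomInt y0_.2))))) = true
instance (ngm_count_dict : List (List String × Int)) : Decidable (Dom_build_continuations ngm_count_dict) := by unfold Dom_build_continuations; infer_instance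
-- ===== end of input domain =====

-- B replaces A's single pass with two in-place running defaultdict accumulators by first
-- materialising the (context, value) groups in one dict of lists and then reading each group's
-- sum and size off the materialised groups (alternative decomposition, same asymptotic cost).

-- ===== PORT A =====
-- the parameter is a Python dict: materialise it (duplicate keys collapse Python-style)
def build_continuations (ngm_count_dict : List (List String × Int)) : List (String × List (List String × Int)) :=
  let dd := PySem.Dict.ofList ngm_count_dict
  let st := dd.keys.foldl
    (fun (st : PySem.Dict (List String) Int × PySem.Dict (List String) Int) key =>
      let context := PySem.List.slice key none (some (-1))   -- key[:-1]
      (st.1.insert context (st.1.getD context 0 + dd.getD key 0),   -- total[context] += ngm_count_dict[key]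
       st.2.insert context (st.2.getD context 0 + 1)))              -- distinct[context] += 1
    (PySem.Dict.empty, PySem.Dict.empty)
  [("total", st.1.items), ("distinct", st.2.items)]

-- ===== PORT B =====
def build_continuations_alt (ngm_count_dict : List (List String × Int)) : List (String × List (List String × Int)) :=
  let pairs := (PySem.Dict.ofList ngm_count_dict).items.map
      (fun kv => (PySem.List.slice kv.1 none (some (-1)), kv.2))           -- [(k[:-1], v) for k, v in …]
  let groups := pairs.foldl
      (fun (d : PySem.Dict (List String) (List Int)) p =>
        d.modify p.1 [] (fun g => g ++ [p.2]))                             -- groups.setdefault(c, []).append(v)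
      PySem.Dict.empty
  let total := groups.items.map (fun cg => (cg.1, cg.2.sum))
  let distinct := groups.items.map (fun cg => (cg.1, (cg.2.length : Int)))
  [("total", total), ("distinct", distinct)]

-- ===== PRECONDITION & SPEC =====
def Spec_build_continuations (ngm_count_dict : List (List String × Int)) (out : List (String × List (List String × Int))) : Prop := out = build_continuations_alt ngm_count_dict
instance (ngm_count_dict : List (List String × Int)) (out : List (String × List (List String × Int))) : Decidable (Spec_build_continuations ngm_count_dict out) := by unfold Spec_build_continuations; infer_instance

-- ===== CLAIM (what is proved, stated in full; the proofs are below) =====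
def Claim_equal_build_continuations : Prop := ∀ (ngm_count_dict : List (List String × Int)), Dom_build_continuations ngm_count_dict → Spec_build_continuations ngm_count_dict (build_continuations ngm_count_dict)

-- ===== LEMMAS AND PROOFS =====

-- the accumulated value of an insert/getD-add loop at key c is the initial value plus the sum of the matching weights
theorem pv_getD_foldl_insert_add {α κ : Type} [BEq κ] [LawfulBEq κ]
    (l : List α) (key : α → κ) (w : α → Int) (t : PySem.Dict κ Int) (c : κ) :
    (l.foldl (fun t x => t.insert (key x) (t.getD (key x) 0 + w x)) t).getD c 0
      = t.getD c 0 + ((l.filter (fun x => key x == c)).map w).sum := by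
  induction l generalizing t with
  | nil => simp
  | cons x xs ih =>
    simp only [List.foldl_cons, ih, List.filter_cons]
    by_cases h : c = key x
    · subst h
      rw [PySem.Dict.getD_insert_self]
      simp [add_assoc]
    · rw [PySem.Dict.getD_insert_of_ne _ _ _ h]
      have : (key x == c) = false := by simpa using Ne.symm h
      simp [this]

theorem build_continuations_eq : ∀ (d : List (List String × Int)),
    build_continuations d = build_continuations_alt d := by
  intro d
  unfold build_continuations build_continuations_alt
  simp only []
  set dd := PySem.Dict.ofList d
  have hnd : dd.keys.Nodup := PySem.Dict.nodup_keys_ofList d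
  -- A: split the pair fold into two independent folds
  have hsplit :
      (dd.keys.foldl
        (fun (st : PySem.Dict (List String) Int × PySem.Dict (List String) Int) key =>
          (st.1.insert (PySem.List.slice key none (some (-1)))
              (st.1.getD (PySem.List.slice key none (some (-1))) 0 + dd.getD key 0),
           st.2.insert (PySem.List.slice key none (some (-1)))
              (st.2.getD (PySem.List.slice key none (some (-1))) 0 + 1)))
        (PySem.Dict.empty, PySem.Dict.empty))
      = (dd.keys.foldl (fun t key => t.insert (PySem.List.slice key none (some (-1)))
            (t.getD (PySem.List.slice key none (some (-1))) 0 + dd.getD key 0)) PySem.Dict.empty,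
         dd.keys.foldl (fun t key => t.insert (PySem.List.slice key none (some (-1)))
            (t.getD (PySem.List.slice key none (some (-1))) 0 + 1)) PySem.Dict.empty) :=
    PySem.List.foldl_prod_mk
      (f := fun (t : PySem.Dict (List String) Int) key => t.insert (PySem.List.slice key none (some (-1)))
          (t.getD (PySem.List.slice key none (some (-1))) 0 + dd.getD key 0))
      (g := fun (t : PySem.Dict (List String) Int) key => t.insert (PySem.List.slice key none (some (-1)))
          (t.getD (PySem.List.slice key none (some (-1))) 0 + 1)) _ _ _
  rw [hsplit]
  -- the context list seen through items vs through keys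
  have hctx : dd.items.map (fun kv => PySem.List.slice kv.1 none (some (-1)))
      = dd.keys.map (fun k => PySem.List.slice k none (some (-1))) := by
    simp [PySem.Dict.keys, List.map_map, Function.comp_def]
  -- a weighted filtered sum over keys as a filtered sum over items
  have hval : ∀ (w : List String → Int) (c : List String),
      ((dd.keys.filter (fun k => PySem.List.slice k none (some (-1)) == c)).map w).sum
        = ((dd.items.filter (fun kv => PySem.List.slice kv.1 none (some (-1)) == c)).map
            (fun kv => w kv.1)).sum := by
    intro w c
    simp [PySem.Dict.keys, List.filter_map, List.map_map, Function.comp_def]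
  -- ===== B side: the groups dict, normalised =====
  set pairs := dd.items.map (fun kv => (PySem.List.slice kv.1 none (some (-1)), kv.2)) with hpairs
  set G := pairs.foldl
      (fun (t : PySem.Dict (List String) (List Int)) p => t.modify p.1 [] (fun g => g ++ [p.2]))
      PySem.Dict.empty with hG
  have hGkeys : G.keys = PySem.Set.ofList (dd.keys.map (fun k => PySem.List.slice k none (some (-1)))) := by
    have h1 : G.keys = PySem.Set.update (PySem.Dict.empty : PySem.Dict (List String) (List Int)).keys
        (pairs.map (fun p => p.1)) :=
      PySem.Dict.keys_foldl_modify_key pairs (fun p => p.1) []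
        (fun _ p => fun g => g ++ [p.2]) PySem.Dict.empty
    rw [h1]
    have h2 : pairs.map (fun p => p.1) = dd.keys.map (fun k => PySem.List.slice k none (some (-1))) := by
      rw [hpairs, List.map_map]
      simpa [Function.comp_def] using hctx
    rw [h2]
    rfl
  have hGnd : G.keys.Nodup :=
    PySem.Dict.nodup_keys_foldl_modify_key pairs (fun p => p.1) []
      (fun _ p => fun g => g ++ [p.2]) PySem.Dict.empty (by simp)
  have hGget : ∀ c, G.getD c []
      = (dd.items.filter (fun kv => PySem.List.slice kv.1 none (some (-1)) == c)).map (fun kv => kv.2) := by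
    intro c
    rw [hG, PySem.Dict.getD_foldl_modify_append pairs PySem.Dict.empty c, PySem.Dict.getD_empty]
    rw [hpairs]
    simp [List.filter_map, List.map_map, Function.comp_def]
  have hGitems : G.items = G.keys.map (fun c => (c, G.getD c [])) :=
    PySem.Dict.items_eq_map_keys G hGnd []
  rw [hGitems, hGkeys, List.map_map, List.map_map]
  -- ===== A side: both result dicts, normalised to the same map over the dedup'd contexts =====
  have hAtotal :
      (dd.keys.foldl (fun t key => t.insert (PySem.List.slice key none (some (-1)))
          (t.getD (PySem.List.slice key none (some (-1))) 0 + dd.getD key 0)) PySem.Dict.empty).items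
        = (PySem.Set.ofList (dd.keys.map (fun k => PySem.List.slice k none (some (-1))))).map
            (fun c => (c, ((dd.items.filter (fun kv => PySem.List.slice kv.1 none (some (-1)) == c)).map
              (fun kv => kv.2)).sum)) := by
    rw [PySem.Dict.items_eq_map_keys _
          (PySem.Dict.nodup_keys_foldl_insert_key _ _ _ _ (by simp)) 0,
        PySem.Dict.keys_foldl_insert_key]
    simp only [PySem.Dict.keys_empty]
    apply List.map_congr_left
    intro c _
    have hv : (dd.keys.foldl (fun (t : PySem.Dict (List String) Int) key =>
          t.insert (PySem.List.slice key none (some (-1)))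
            (t.getD (PySem.List.slice key none (some (-1))) 0 + dd.getD key 0)) PySem.Dict.empty).getD c 0
        = (PySem.Dict.empty : PySem.Dict (List String) Int).getD c 0
            + ((dd.keys.filter (fun k => PySem.List.slice k none (some (-1)) == c)).map
                (fun k => dd.getD k 0)).sum :=
      pv_getD_foldl_insert_add dd.keys (fun k => PySem.List.slice k none (some (-1))) (fun k => dd.getD k 0) _ c
    rw [hv, PySem.Dict.getD_empty, zero_add, hval (fun k => dd.getD k 0) c]
    congr 2
    apply List.map_congr_left
    intro kv hkv
    have hmem : kv ∈ dd.items := List.mem_of_mem_filter hkv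
    exact PySem.Dict.getD_of_mem_items dd (k := kv.1) (v := kv.2) (by simpa using hmem) hnd 0
  have hAdistinct :
      (dd.keys.foldl (fun t key => t.insert (PySem.List.slice key none (some (-1)))
          (t.getD (PySem.List.slice key none (some (-1))) 0 + 1)) PySem.Dict.empty).items
        = (PySem.Set.ofList (dd.keys.map (fun k => PySem.List.slice k none (some (-1))))).map
            (fun c => (c, (((dd.items.filter (fun kv => PySem.List.slice kv.1 none (some (-1)) == c)).map
              (fun kv => kv.2)).length : Int))) := by
    rw [PySem.Dict.items_eq_map_keys _
          (PySem.Dict.nodup_keys_foldl_insert_key _ _ _ _ (by simp)) 0,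
        PySem.Dict.keys_foldl_insert_key]
    simp only [PySem.Dict.keys_empty]
    apply List.map_congr_left
    intro c _
    have hv : (dd.keys.foldl (fun (t : PySem.Dict (List String) Int) key =>
          t.insert (PySem.List.slice key none (some (-1)))
            (t.getD (PySem.List.slice key none (some (-1))) 0 + 1)) PySem.Dict.empty).getD c 0
        = (PySem.Dict.empty : PySem.Dict (List String) Int).getD c 0
            + ((dd.keys.filter (fun k => PySem.List.slice k none (some (-1)) == c)).map
                (fun _ => (1 : Int))).sum :=
      pv_getD_foldl_insert_add dd.keys (fun k => PySem.List.slice k none (some (-1))) (fun _ => 1) _ c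
    rw [hv, PySem.Dict.getD_empty, zero_add, hval (fun _ => 1) c]
    rw [PySem.List.sum_map_const_int]
    simp
  rw [hAtotal, hAdistinct]
  -- both sides are now maps over the same context list; align the per-context values
  refine congrArg₂ (fun x y => [("total", x), ("distinct", y)]) ?_ ?_
  · apply List.map_congr_left
    intro c _
    simp [hGget c]
  · apply List.map_congr_left
    intro c _
    simp [hGget c]

-- ===== VERDICT (by name: the statement is the Claim_ definition above) =====
theorem build_continuations_spec : Claim_equal_build_continuations := by
  intro d _
  unfold Spec_build_continuations
  exact build_continuations_eq d
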